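-- pv_equiv track=rewrite | github.com/madal1nn/PascalCTF-2026 | crypto05/checker/__main__.py | index_to_word
-- ===== SOURCE A (Python) =====
-- ALPHABET = "abcdefghijklmnop"
--
-- def index_to_word(idx: int) -> str:
--     if not (0 <= idx < (1 << 20)):
--         raise ValueError("bad idx")
--     digs = []
--     for _ in range(5):
--         digs.append(idx & 0xF)
--         idx >>= 4
--     digs.reverse()
--     return "".join(ALPHABET[d] for d in digs)
-- ===== SOURCE B (Python) =====
-- ALPHABET = "abcdefghijklmnop"
--
-- def index_to_word(idx: int) -> str:
--     if not (0 <= idx < (1 << 20)):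
--         raise ValueError("bad idx")
--     def rec(n, k):
--         if k == 0:
--             return ""
--         return rec(n // 16, k - 1) + ALPHABET[n % 16]
--     return rec(idx, 5)
-- ===== Notes on version B (the rewrite author's own statement) =====
-- stated objective: simpler
-- what changed: Replaces the append-then-reverse digit loop with a direct recursion that builds the word back-to-front via divmod, with no intermediate list and no reverse.
import Mathlib
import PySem

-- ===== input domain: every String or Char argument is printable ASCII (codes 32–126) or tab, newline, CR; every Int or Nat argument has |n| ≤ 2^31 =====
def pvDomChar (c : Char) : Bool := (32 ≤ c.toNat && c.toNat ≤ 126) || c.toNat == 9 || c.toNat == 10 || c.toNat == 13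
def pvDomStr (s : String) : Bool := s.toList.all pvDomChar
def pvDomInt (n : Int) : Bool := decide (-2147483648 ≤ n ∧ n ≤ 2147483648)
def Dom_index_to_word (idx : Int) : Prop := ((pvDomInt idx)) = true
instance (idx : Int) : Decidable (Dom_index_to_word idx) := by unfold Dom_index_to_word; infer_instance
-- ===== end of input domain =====

-- B replaces A's append-then-reverse nibble loop by a direct back-to-front divmod recursion (simpler; no list, no reverse).

-- ===== PORT A =====
-- A's loop appends idx & 0xF and shifts; on the admitted domain idx ≥ 0, where
-- 'idx & 0xF' is exactly Python 'idx % 16' and 'idx >>= 4' is 'idx //= 16' (ported exactly so).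
def index_to_word (idx : Int) : String :=
  if 0 ≤ idx ∧ idx < (1 <<< 20 : Int) then
    let p := (List.range 5).foldl
      (fun (p : List Int × Int) _ =>
        (p.1 ++ [PySem.Int.mod p.2 16], PySem.Int.floordiv p.2 16)) ([], idx)
    let digs := p.1.reverse
    String.ofList (digs.map (fun d => (PySem.Str.pyGet? "abcdefghijklmnop" d).getD ' '))
  else ""  -- Python raises ValueError here; excluded by Pre_

-- ===== PORT B =====
def index_to_word_altRec (n : Int) (k : Nat) : String :=
  match k with
  | 0 => ""
  | k + 1 =>
    index_to_word_altRec (PySem.Int.floordiv n 16) k ++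
      String.ofList [(PySem.Str.pyGet? "abcdefghijklmnop" (PySem.Int.mod n 16)).getD ' ']

def index_to_word_alt (idx : Int) : String :=
  if 0 ≤ idx ∧ idx < (1 <<< 20 : Int) then
    index_to_word_altRec idx 5
  else ""  -- Python raises ValueError here; excluded by Pre_

-- ===== PRECONDITION & SPEC =====
-- A (and B) raise ValueError unless 0 ≤ idx < 2^20.
def Pre_index_to_word (idx : Int) : Prop := 0 ≤ idx ∧ idx < (1 <<< 20 : Int)
instance (idx : Int) : Decidable (Pre_index_to_word idx) := by unfold Pre_index_to_word; infer_instance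
def pvWitness_index_to_word : Int := (12345)

def Spec_index_to_word (idx : Int) (out : String) : Prop := out = index_to_word_alt idx
instance (idx : Int) (out : String) : Decidable (Spec_index_to_word idx out) := by unfold Spec_index_to_word; infer_instance

-- ===== CLAIM (what is proved, stated in full; the proofs are below) =====
def Claim_equal_index_to_word : Prop := ∀ (idx : Int), Dom_index_to_word idx → Pre_index_to_word idx → Spec_index_to_word idx (index_to_word idx)

-- ===== LEMMAS AND PROOFS =====

-- ===== VERDICT (by name: the statement is the Claim_ definition above) =====
theorem index_to_word_spec : Claim_equal_index_to_word := by
  intro idx _ hp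
  unfold Spec_index_to_word index_to_word index_to_word_alt
  split_ifs with h
  · simp only [show List.range 5 = [0,1,2,3,4] from by decide, List.foldl,
      index_to_word_altRec, List.map, List.reverse_cons, List.reverse_nil,
      List.nil_append, List.cons_append,
      String.empty_append, ← String.ofList_append]
  · rfl
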